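-- pv_equiv track=rewrite | github.com/StanfordCosyne/spatial_tuning_model | scripts/candidate_models.py | handle_irregular_idx
-- ===== SOURCE A (Python) =====
-- def handle_irregular_idx(subject_idx):
--     new_subject_idx = [0] * len(subject_idx)
--     curr_idx = 0
--     for sidx in range(len(subject_idx)):
--         if sidx != 0:
--             if subject_idx[sidx] == subject_idx[sidx-1]:
--                 new_subject_idx[sidx] = curr_idx
--             else:
--                 curr_idx+=1
--                 new_subject_idx[sidx] = curr_idx
--         else:
--             new_subject_idx[sidx] = curr_idx
--
--     subject_idx = new_subject_idx
--     return subject_idx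
-- ===== SOURCE B (Python) =====
-- def handle_irregular_idx(subject_idx):
--     # Run-splitting: repeatedly measure the leading run of equal elements,
--     # emit the current group label once per element of that run, advance past it.
--     out = []
--     g = 0
--     i = 0
--     n = len(subject_idx)
--     while i < n:
--         j = i + 1
--         while j < n and subject_idx[j] == subject_idx[i]:
--             j += 1
--         out += [g] * (j - i)
--         g += 1
--         i = j
--     return out
-- ===== Notes on version B (the rewrite author's own statement) =====
-- stated objective: alternative
-- what changed: Replaces A's single element-wise stateful loop writing into a preallocated array by a recursive run-splitting scheme: each step measures the leading run of equal elements, emits its group label replicated over the run, and recurses on the remaining suffix with the next label.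
import Mathlib
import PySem

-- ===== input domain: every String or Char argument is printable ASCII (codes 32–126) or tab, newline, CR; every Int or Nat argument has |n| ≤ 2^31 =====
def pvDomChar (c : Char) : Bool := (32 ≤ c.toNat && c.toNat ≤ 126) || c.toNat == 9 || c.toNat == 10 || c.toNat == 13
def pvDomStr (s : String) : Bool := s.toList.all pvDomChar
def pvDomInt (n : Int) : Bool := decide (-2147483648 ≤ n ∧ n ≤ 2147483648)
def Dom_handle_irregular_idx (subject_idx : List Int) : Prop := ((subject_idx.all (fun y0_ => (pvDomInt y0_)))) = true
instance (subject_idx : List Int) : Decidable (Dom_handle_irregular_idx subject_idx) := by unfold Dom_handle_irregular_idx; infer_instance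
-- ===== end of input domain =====

-- B replaces A's single element-wise stateful loop over a preallocated array by a
-- recursive run-splitting scheme (measure the leading run, emit its label replicated,
-- recurse on the suffix); same O(n) cost.


-- ===== PORT A =====
-- the loop body of A (indices always in range, so the total pyGetD/pySetD forms are exact)
def stepA (l : List Int) (st : List Int × Int) (sidx : Int) : List Int × Int :=
  if sidx ≠ 0 then
    if PySem.List.pyGetD l sidx 0 = PySem.List.pyGetD l (sidx - 1) 0 then
      (PySem.List.pySetD st.1 sidx st.2, st.2)
    else
      (PySem.List.pySetD st.1 sidx (st.2 + 1), st.2 + 1)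
  else
    (PySem.List.pySetD st.1 sidx st.2, st.2)

def handle_irregular_idx (subject_idx : List Int) : List Int :=
  ((PySem.List.pyRange 0 (subject_idx.length : Int) 1).foldl (stepA subject_idx)
    (List.replicate subject_idx.length 0, 0)).1

-- ===== PORT B =====
-- Source B's outer run loop, rendered as the obvious structural recursion: the inner while
-- counts the leading run length j-i = 1 + length of the matching prefix of the tail
-- (transcribed as the takeWhile length), the step emits [g]*(j-i) and advances past the run.
def goB (xs : List Int) (g : Int) : List Int :=
  match xs with
  | [] => []
  | x :: rest =>
      let t := rest.takeWhile (fun y => y == x)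
      List.replicate (1 + t.length) g ++ goB (rest.drop t.length) (g + 1)
termination_by xs.length
decreasing_by
  simp only [List.length_drop, List.length_cons]
  omega

def handle_irregular_idx_alt (subject_idx : List Int) : List Int :=
  goB subject_idx 0

-- ===== PRECONDITION & SPEC =====
def Spec_handle_irregular_idx (subject_idx : List Int) (out : List Int) : Prop := out = handle_irregular_idx_alt subject_idx
instance (subject_idx : List Int) (out : List Int) : Decidable (Spec_handle_irregular_idx subject_idx out) := by unfold Spec_handle_irregular_idx; infer_instance

-- ===== CLAIM (what is proved, stated in full; the proofs are below) =====
def Claim_equal_handle_irregular_idx : Prop := ∀ (subject_idx : List Int), Dom_handle_irregular_idx subject_idx → Spec_handle_irregular_idx subject_idx (handle_irregular_idx subject_idx)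

-- ===== LEMMAS AND PROOFS =====

-- canonical labels of the tail, given current label c and previous element prev
def labels (c prev : Int) : List Int → List Int
  | [] => []
  | y :: ys => (if y = prev then c else c + 1) :: labels (if y = prev then c else c + 1) y ys

-- running value of A's counter after the tail
def lastLabel (c prev : Int) : List Int → Int
  | [] => c
  | y :: ys => lastLabel (if y = prev then c else c + 1) y ys

lemma loopA (l : List Int) : ∀ (k i : Nat) (out : List Int) (c : Int),
    i + k = l.length → 1 ≤ i → out.length = l.length →
    (PySem.List.pyRange (i : Int) (l.length : Int) 1).foldl (stepA l) (out, c)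
      = (out.take i ++ labels c (l.getD (i - 1) 0) (l.drop i),
         lastLabel c (l.getD (i - 1) 0) (l.drop i)) := by
  intro k
  induction k with
  | zero =>
      intro i out c hik hi hlen
      have h1 : l.drop i = [] := List.drop_eq_nil_of_le (by omega)
      have h2 : out.take i = out := List.take_of_length_le (by omega)
      rw [PySem.List.pyRange_one_eq_nil (by omega), List.foldl_nil, h1, h2]
      simp [labels, lastLabel]
  | succ k ih =>
      intro i out c hik hi hlen
      have hlt : i < l.length := by omega
      rw [PySem.List.pyRange_one_cons (by exact_mod_cast hlt)]
      simp only [List.foldl_cons]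
      have hstep : stepA l (out, c) (i : Int)
          = (out.set i (if l.getD i 0 = l.getD (i - 1) 0 then c else c + 1),
             if l.getD i 0 = l.getD (i - 1) 0 then c else c + 1) := by
        have hcast : ((i : Int) - 1) = ((i - 1 : Nat) : Int) := by omega
        simp only [stepA, hcast, PySem.List.pyGetD_natCast, PySem.List.pySetD_natCast]
        have : (i : Int) ≠ 0 := by omega
        split_ifs <;> simp_all
      rw [hstep]
      have hcast1 : ((i : Int) + 1) = ((i + 1 : Nat) : Int) := by omega
      rw [hcast1, ih (i + 1) _ _ (by omega) (by omega) (by simpa using hlen)]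
      set c' : Int := if l.getD i 0 = l.getD (i - 1) 0 then c else c + 1 with hc'
      have hdrop : l.drop i = l.getD i 0 :: l.drop (i + 1) := by
        rw [List.drop_eq_getElem_cons hlt, List.getD_eq_getElem l 0 hlt]
      have htake : (out.set i c').take (i + 1) = out.take i ++ [c'] := by
        have hio : i < out.length := by omega
        rw [List.set_eq_take_append_cons_drop, if_pos hio, List.take_append]
        simp [List.length_take, Nat.min_eq_left hio.le, List.take_take]
      have hsimp : i + 1 - 1 = i := by omega
      rw [htake, hsimp, hdrop]
      have hlab : labels c (l.getD (i - 1) 0) (l.getD i 0 :: l.drop (i + 1))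
          = c' :: labels c' (l.getD i 0) (l.drop (i + 1)) := by
        simp only [labels, hc']
      have hlast : lastLabel c (l.getD (i - 1) 0) (l.getD i 0 :: l.drop (i + 1))
          = lastLabel c' (l.getD i 0) (l.drop (i + 1)) := by
        simp only [lastLabel, hc']
      rw [hlab, hlast]
      simp

-- B's run-splitting recursion computes the canonical labels
lemma labels_eq_goB (ys : List Int) : ∀ (prev c : Int),
    labels c prev ys
      = List.replicate (ys.takeWhile (fun y => y == prev)).length c
          ++ goB (ys.drop (ys.takeWhile (fun y => y == prev)).length) (c + 1) := by
  induction ys with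
  | nil => intro prev c; simp [labels, goB]
  | cons y ys ih =>
      intro prev c
      by_cases h : y = prev
      · subst h
        simp only [labels, List.takeWhile_cons, beq_self_eq_true, if_pos,
          List.length_cons, List.replicate_succ, List.drop_succ_cons, List.cons_append,
          List.cons.injEq, true_and]
        exact ih y c
      · have hb : (fun z => z == prev) y = false := by simp [h]
        simp only [labels, if_neg h, List.takeWhile_cons, hb, Bool.false_eq_true,
          if_false, List.length_nil, List.replicate_zero, List.nil_append, List.drop_zero]
        rw [goB]
        simp only [Nat.add_comm 1, List.replicate_succ, List.cons_append, List.cons.injEq,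
          true_and]
        exact ih y (c + 1)

-- ===== VERDICT (by name: the statement is the Claim_ definition above) =====
theorem handle_irregular_idx_spec : Claim_equal_handle_irregular_idx := by
  intro l _
  show handle_irregular_idx l = handle_irregular_idx_alt l
  match l with
  | [] =>
      unfold handle_irregular_idx handle_irregular_idx_alt
      rw [goB]
      decide
  | x :: xs =>
      unfold handle_irregular_idx handle_irregular_idx_alt
      rw [PySem.List.pyRange_one_cons (by simp)]
      simp only [List.foldl_cons]
      have h0 : stepA (x :: xs) (List.replicate (x :: xs).length 0, 0) 0
          = (List.replicate (x :: xs).length 0, 0) := by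
        simp [stepA, PySem.List.pySetD_of_nonneg, List.replicate_succ]
      rw [h0, show ((0 : Int) + 1) = ((1 : Nat) : Int) by norm_num,
        loopA (x :: xs) xs.length 1 (List.replicate (x :: xs).length 0) 0 (by simp only [List.length_cons]; omega) (by omega) (by simp)]
      simp only [Nat.sub_self, List.getD_cons_zero, List.drop_one, List.tail_cons]
      rw [labels_eq_goB xs x 0, goB]
      rw [Nat.add_comm 1, List.replicate_succ]
      simp
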